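-- pv_equiv track=rewrite | github.com/Miesvanderlippe/ISCRIP | Overig/achterpoortjes.py | omkeren
-- ===== SOURCE A (Python) =====
-- from string import ascii_letters
--
-- def omkeren(text: str):
--     """
--     Encode a string with 'Anna' encoding used in 1863 American civil war.
--     :param text: Input
--     :return: Encoded string
--     """
--     new = ""
--     # The flipped _textual_ content of the string
--     flipped = [x.lower() for x in reversed(text) if x in ascii_letters]
--
--     # The positions of uppercase characters in the string
--     uppercase_chars = [x for x, y in enumerate(text) if y.isupper()]
--
--     # The special characters and their positions
--     specials = {x:y for x, y in enumerate(text) if y not in ascii_letters}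
--
--     # The next letter to be encoded.
--     # Kept separate because the position in the string is unrelated to the
--     # letter encoded. (other chars keep their position)
--     current = 0
--
--     for index in range(0, len(text)):
--         # If the current index is in an uppercase char in the source, it's a
--         # letter and needs to be an uppercase letter in the encoded message.
--         # All textual content will be reversed.
--         if index in uppercase_chars:
--             new += flipped[current].upper()
--             current += 1
--         # If the current char is a special char in the source, it needs not to
--         # be a letter and remain at it's original position.
--         elif index in specials.keys():
--             new += specials[index]
--         # If it's neither, it's a lowercase letter from the reversed textual
--         # content.
--         else:
--             new += flipped[current]
--             current += 1
--
--     return new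
-- ===== SOURCE B (Python) =====
-- from string import ascii_letters
--
-- def omkeren(text: str):
--     """Anna encoding by gather/scatter: collect the letter positions, pair them
--     with the reversed lowercased letters, and write each back in place keeping
--     the original case; non-letters are never touched."""
--     chars = list(text)
--     letter_pos = [i for i, c in enumerate(chars) if c in ascii_letters]
--     rev = [chars[i].lower() for i in reversed(letter_pos)]
--     for i, c in zip(letter_pos, rev):
--         chars[i] = c.upper() if chars[i].isupper() else c
--     return "".join(chars)
-- ===== Notes on version B (the rewrite author's own statement) =====
-- stated objective: simpler
-- what changed: B replaces A's per-index classification loop (with its precomputed uppercase-index list, specials dict and running letter counter) by a gather/scatter: it collects the letter positions once, zips them with the reversed lowercased letters, and overwrites exactly those positions in a copy of the string, leaving every non-letter untouched and using no counter and no membership tests in the loop.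
import Mathlib
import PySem

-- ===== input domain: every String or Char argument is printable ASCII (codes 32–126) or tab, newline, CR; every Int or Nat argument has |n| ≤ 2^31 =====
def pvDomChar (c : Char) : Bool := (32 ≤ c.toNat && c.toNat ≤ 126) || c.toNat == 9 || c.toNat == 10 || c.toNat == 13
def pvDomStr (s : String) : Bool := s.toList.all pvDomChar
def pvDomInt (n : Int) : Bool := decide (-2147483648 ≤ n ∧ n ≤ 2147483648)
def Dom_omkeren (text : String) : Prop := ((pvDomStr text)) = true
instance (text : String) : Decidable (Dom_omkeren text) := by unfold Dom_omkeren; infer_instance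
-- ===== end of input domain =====

-- B replaces A's per-index classification loop (uppercase-index list + specials dict + letter counter)
-- by a gather/scatter: letter positions zipped with the reversed lowercased letters are written back
-- in place, non-letters untouched; objective: simpler.

-- `x in ascii_letters` (exact: ASCII A-Z / a-z)
def pvLetter (c : Char) : Bool := (65 ≤ c.toNat && c.toNat ≤ 90) || (97 ≤ c.toNat && c.toNat ≤ 122)

-- ===== PORT A =====
-- `[x for x, y in enumerate(text) if y.isupper()]`
def pvUpcList (cs : List Char) : List Int :=
  (PySem.List.enumerate cs 0).filterMap (fun p => if PySem.Chars.isupper p.2 then some p.1 else none)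

-- one step of the dict comprehension `{x:y for x, y in enumerate(text) if y not in ascii_letters}`
def pvSpecStep (d : PySem.Dict Int Char) (p : Int × Char) : PySem.Dict Int Char :=
  if pvLetter p.2 then d else d.insert p.1 p.2

def pvSpecDict (cs : List Char) : PySem.Dict Int Char :=
  (PySem.List.enumerate cs 0).foldl pvSpecStep PySem.Dict.empty

-- the body of A's `for index in range(0, len(text))` loop; state = (new, current)
def pvStepA (upc : List Int) (sp : PySem.Dict Int Char) (fl : List Char)
    (st : List Char × Nat) (index : Int) : List Char × Nat :=
  if upc.contains index then
    (st.1 ++ [PySem.Chars.upperChar (PySem.List.pyGetD fl (st.2 : Int) ' ')], st.2 + 1)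
  else if sp.contains index then
    (st.1 ++ [sp.getD index ' '], st.2)
  else
    (st.1 ++ [PySem.List.pyGetD fl (st.2 : Int) ' '], st.2 + 1)

def omkeren (text : String) : String :=
  let cs := text.toList
  let flipped : List Char := (cs.reverse.filter pvLetter).map PySem.Chars.lowerChar
  let r := (PySem.List.pyRange 0 (PySem.Str.len text) 1).foldl
    (pvStepA (pvUpcList cs) (pvSpecDict cs) flipped) ([], 0)
  String.ofList r.1

-- ===== PORT B =====
-- `[i for i, c in enumerate(chars) if c in ascii_letters]`
def pvLpos (cs : List Char) : List Int :=
  (PySem.List.enumerate cs 0).filterMap (fun p => if pvLetter p.2 then some p.1 else none)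

-- one step of B's `for i, c in zip(letter_pos, rev): chars[i] = c.upper() if chars[i].isupper() else c`
def pvScatStep (st : List Char) (p : Int × Char) : List Char :=
  if PySem.Chars.isupper (PySem.List.pyGetD st p.1 ' ') then
    PySem.List.pySetD st p.1 (PySem.Chars.upperChar p.2)
  else
    PySem.List.pySetD st p.1 p.2

def omkeren_alt (text : String) : String :=
  let chars := text.toList
  let letterPos := pvLpos chars
  let rev := letterPos.reverse.map (fun i => PySem.Chars.lowerChar (PySem.List.pyGetD chars i ' '))
  String.ofList ((letterPos.zip rev).foldl pvScatStep chars)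

-- ===== PRECONDITION & SPEC =====
def Spec_omkeren (text : String) (out : String) : Prop := out = omkeren_alt text
instance (text : String) (out : String) : Decidable (Spec_omkeren text out) := by unfold Spec_omkeren; infer_instance

-- ===== CLAIM (what is proved, stated in full; the proofs are below) =====
def Claim_equal_omkeren : Prop := ∀ (text : String), Dom_omkeren text → Spec_omkeren text (omkeren text)

-- ===== LEMMAS AND PROOFS =====

-- common intermediate form: letters of cs replaced, in order, by the next element of fl, case kept
def pvSpec : List Char → List Char → List Char
  | [], _ => []
  | c :: cs, fl =>
    if pvLetter c then
      (if PySem.Chars.isupper c then PySem.Chars.upperChar (fl.headD ' ') else fl.headD ' ')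
        :: pvSpec cs fl.tail
    else c :: pvSpec cs fl

lemma pv_isupper_letter (c : Char) (h : PySem.Chars.isupper c = true) : pvLetter c = true := by
  simp [PySem.Chars.isupper, Char.le_def] at h
  have h1 : 65 ≤ c.toNat := UInt32.le_iff_toNat_le.mp h.1
  have h2 : c.toNat ≤ 90 := UInt32.le_iff_toNat_le.mp h.2
  unfold pvLetter
  simp only [Bool.or_eq_true, Bool.and_eq_true, decide_eq_true_eq]
  left
  exact ⟨h1, h2⟩

lemma pvSpec_cons (c : Char) (cs fl : List Char) :
    pvSpec (c :: cs) fl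
      = if pvLetter c then
          (if PySem.Chars.isupper c then PySem.Chars.upperChar (fl.headD ' ') else fl.headD ' ')
            :: pvSpec cs fl.tail
        else c :: pvSpec cs fl := rfl

-- the body of A's loop after the tables are replaced by direct tests (proof-side only)
def pvStep1 (fl : List Char) (st : List Char × Nat) (c : Char) : List Char × Nat :=
  if PySem.Chars.isupper c then
    (st.1 ++ [PySem.Chars.upperChar (PySem.List.pyGetD fl (st.2 : Int) ' ')], st.2 + 1)
  else if !pvLetter c then
    (st.1 ++ [c], st.2)
  else
    (st.1 ++ [PySem.List.pyGetD fl (st.2 : Int) ' '], st.2 + 1)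

-- a fold of pvSpecStep never touches key j if no pair in the list carries it
lemma pv_spec_get_skip (t : List (Int × Char)) (d : PySem.Dict Int Char) (j : Int)
    (h : ∀ p ∈ t, p.1 ≠ j) :
    (t.foldl pvSpecStep d).get? j = d.get? j := by
  induction t generalizing d with
  | nil => rfl
  | cons p t ih =>
    simp only [List.foldl_cons]
    rw [ih _ (fun q hq => h q (List.mem_cons_of_mem _ hq))]
    unfold pvSpecStep
    split_ifs with hl
    · rfl
    · exact PySem.Dict.get?_insert_of_ne d p.2 (Ne.symm (h p List.mem_cons_self))

lemma pv_spec_get (l : List (Int × Char)) (d : PySem.Dict Int Char) (j : Int) (c : Char)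
    (hmem : (j, c) ∈ l) (hp : l.Pairwise (fun p q => p.1 < q.1)) (hd : d.get? j = none) :
    (l.foldl pvSpecStep d).get? j = if pvLetter c then none else some c := by
  induction l generalizing d with
  | nil => cases hmem
  | cons p t ih =>
    rcases List.pairwise_cons.mp hp with ⟨hpt, htp⟩
    simp only [List.foldl_cons]
    rcases List.mem_cons.mp hmem with heq | hmt
    · subst heq
      rw [pv_spec_get_skip t _ j (fun q hq => (hpt q hq).ne')]
      unfold pvSpecStep
      split_ifs with hl
      · exact hd
      · exact PySem.Dict.get?_insert_self d j c
    · have hlt : p.1 < j := hpt (j, c) hmt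
      have hstep : (pvSpecStep d p).get? j = none := by
        unfold pvSpecStep
        split_ifs with hl
        · exact hd
        · rw [PySem.Dict.get?_insert_of_ne d p.2 (ne_of_gt hlt)]; exact hd
      exact ih _ hmt htp hstep

-- A's uppercase-positions list contains index k iff cs[k] is uppercase
lemma pv_upc_contains (cs : List Char) (k : Nat) (hk : k < cs.length) :
    (pvUpcList cs).contains ((k : Nat) : Int) = PySem.Chars.isupper cs[k] := by
  unfold pvUpcList
  by_cases hu : PySem.Chars.isupper cs[k] = true
  · rw [hu]
    have : ((k : Nat) : Int) ∈ (PySem.List.enumerate cs 0).filterMap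
        (fun p => if PySem.Chars.isupper p.2 then some p.1 else none) := by
      refine List.mem_filterMap.mpr ⟨((k : Int), cs[k]), ?_, by simp [hu]⟩
      exact (PySem.List.mem_enumerate_iff cs 0 _).mpr ⟨k, hk, by simp⟩
    simpa using this
  · simp only [Bool.not_eq_true] at hu
    rw [hu]
    simp only [List.contains_eq_mem, decide_eq_false_iff_not]
    intro hmem
    rcases List.mem_filterMap.mp hmem with ⟨p, hp, hf⟩
    rcases (PySem.List.mem_enumerate_iff cs 0 p).mp hp with ⟨m, hm, rfl⟩
    by_cases hum : PySem.Chars.isupper cs[m] = true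
    · simp only [hum, if_pos] at hf
      have hmk : m = k := by
        have := Option.some.inj hf
        omega
      subst hmk
      simp_all
    · simp [hum] at hf

-- characterisation of A's specials dict at position k
lemma pv_spec_char (cs : List Char) (k : Nat) (hk : k < cs.length) :
    (pvSpecDict cs).get? ((k : Nat) : Int) = if pvLetter cs[k] then none else some cs[k] := by
  unfold pvSpecDict
  refine pv_spec_get _ _ _ cs[k] ?_ (PySem.List.pairwise_lt_enumerate cs 0) (PySem.Dict.get?_empty _)
  exact (PySem.List.mem_enumerate_iff cs 0 _).mpr ⟨k, hk, by simp⟩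

-- A's index loop over range(len) equals the direct fold over the characters
lemma pv_fold_eq (cs : List Char) (fl : List Char) (init : List Char × Nat) :
    (PySem.List.pyRange 0 (cs.length : Int) 1).foldl
      (pvStepA (pvUpcList cs) (pvSpecDict cs) fl) init
    = cs.foldl (pvStep1 fl) init := by
  have hrange : PySem.List.pyRange 0 ((cs.length : Nat) : Int) 1
      = (PySem.List.enumerate cs 0).map (fun p => p.1) := by
    rw [PySem.List.map_fst_enumerate]
    norm_num
  rw [hrange, List.foldl_map]
  have hcongr : (PySem.List.enumerate cs 0).foldl
      (fun st p => pvStepA (pvUpcList cs) (pvSpecDict cs) fl st p.1) init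
      = (PySem.List.enumerate cs 0).foldl (fun st p => pvStep1 fl st p.2) init := by
    apply PySem.List.foldl_congr_mem
    intro st p hp
    rcases (PySem.List.mem_enumerate_iff cs 0 p).mp hp with ⟨k, hk, rfl⟩
    simp only [zero_add]
    unfold pvStepA pvStep1
    rw [pv_upc_contains cs k hk]
    rw [PySem.Dict.contains_eq_isSome_get?, pv_spec_char cs k hk]
    rw [PySem.Dict.getD_eq_get?_getD, pv_spec_char cs k hk]
    by_cases hu : PySem.Chars.isupper cs[k] = true
    · simp [hu]
    · by_cases hl : pvLetter cs[k] = true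
      · simp [hu, hl]
      · simp [hu, hl]
  rw [hcongr]
  conv_rhs => rw [← PySem.List.map_snd_enumerate cs 0, List.foldl_map]

-- the counter fold equals pvSpec, the counter indexing fl by a running drop
lemma pv_step1_spec (cs : List Char) : ∀ (fl acc : List Char) (cur : Nat),
    cur + (cs.filter pvLetter).length ≤ fl.length →
    cs.foldl (pvStep1 fl) (acc, cur)
      = (acc ++ pvSpec cs (fl.drop cur), cur + (cs.filter pvLetter).length) := by
  induction cs with
  | nil => intro fl acc cur h; simp [pvSpec]
  | cons c cs ih =>
    intro fl acc cur h
    by_cases hl : pvLetter c = true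
    · have hcnt : ((c :: cs).filter pvLetter).length = (cs.filter pvLetter).length + 1 := by
        simp [hl]
      have hcur : cur < fl.length := by omega
      have hget : PySem.List.pyGetD fl ((cur : Nat) : Int) ' ' = fl[cur] := by
        rw [PySem.List.pyGetD_natCast]
        exact List.getD_eq_getElem fl ' ' hcur
      have hdrop : fl.drop cur = fl[cur] :: fl.drop (cur + 1) :=
        List.drop_eq_getElem_cons hcur
      by_cases hu : PySem.Chars.isupper c = true
      · simp only [List.foldl_cons, pvStep1, hu, if_pos, hget]
        rw [ih fl _ (cur + 1) (by omega)]
        rw [hdrop, pvSpec_cons, if_pos hl, if_pos hu]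
        simp only [List.headD_cons, List.tail_cons, Prod.mk.injEq, List.append_assoc,
          List.singleton_append, hcnt]
        exact ⟨trivial, by omega⟩
      · simp only [List.foldl_cons, pvStep1, hu, hl, Bool.not_true, Bool.false_eq_true,
          if_false, hget]
        rw [ih fl _ (cur + 1) (by omega)]
        rw [hdrop, pvSpec_cons, if_pos hl, if_neg (by simp [hu])]
        simp only [List.headD_cons, List.tail_cons, Prod.mk.injEq, List.append_assoc,
          List.singleton_append, hcnt]
        exact ⟨trivial, by omega⟩
    · have hu : PySem.Chars.isupper c = false := by
        by_contra hc
        exact absurd (pv_isupper_letter c (by simpa using hc)) (by simpa using hl)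
      have hcnt : ((c :: cs).filter pvLetter).length = (cs.filter pvLetter).length := by
        simp [hl]
      simp only [List.foldl_cons, pvStep1, hu, hl, Bool.false_eq_true, if_false, Bool.not_false,
        if_pos]
      rw [ih fl _ cur (by omega)]
      rw [pvSpec_cons, if_neg (by simp [hl])]
      simp only [List.append_assoc, List.singleton_append, hcnt]

-- ===== B-side lemmas =====

lemma pv_enum_shift (cs : List Char) : ∀ (n : Int),
    PySem.List.enumerate cs (n + 1) = (PySem.List.enumerate cs n).map (fun p => (p.1 + 1, p.2)) := by
  induction cs with
  | nil => intro n; simp [PySem.List.enumerate_nil]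
  | cons c cs ih =>
    intro n
    rw [PySem.List.enumerate_cons, PySem.List.enumerate_cons, List.map_cons]
    rw [show n + 1 + 1 = (n + 1) + 1 by ring, ih (n + 1)]

lemma pv_fm_shift (l : List (Int × Char)) :
    List.filterMap ((fun p : Int × Char => if pvLetter p.2 = true then some p.1 else none)
        ∘ fun p => (p.1 + 1, p.2)) l
      = (List.filterMap (fun p : Int × Char => if pvLetter p.2 = true then some p.1 else none)
          l).map (· + 1) := by
  rw [List.map_filterMap]
  apply List.filterMap_congr
  intro p _
  by_cases hp : pvLetter p.2 = true <;> simp [hp]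

lemma pv_lpos_cons (c : Char) (cs : List Char) :
    pvLpos (c :: cs)
      = (if pvLetter c then [(0 : Int)] else []) ++ (pvLpos cs).map (· + 1) := by
  unfold pvLpos
  rw [PySem.List.enumerate_cons, List.filterMap_cons]
  rw [pv_enum_shift cs 0, List.filterMap_map, pv_fm_shift]
  by_cases hl : pvLetter c = true <;> simp [hl]

lemma pv_lpos_nonneg (cs : List Char) : ∀ i ∈ pvLpos cs, 0 ≤ i := by
  intro i hi
  unfold pvLpos at hi
  rcases List.mem_filterMap.mp hi with ⟨p, hp, hf⟩
  rcases (PySem.List.mem_enumerate_iff cs 0 p).mp hp with ⟨k, hk, rfl⟩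
  by_cases hl : pvLetter cs[k] = true
  · simp only [hl, if_pos] at hf
    have := Option.some.inj hf
    omega
  · simp [hl] at hf

lemma pv_pyGetD_cons_succ (c : Char) (cs : List Char) (i : Int) (d : Char) (h : 0 ≤ i) :
    PySem.List.pyGetD (c :: cs) (i + 1) d = PySem.List.pyGetD cs i d := by
  lift i to Nat using h
  rw [show ((i : Nat) : Int) + 1 = ((i + 1 : Nat) : Int) by push_cast; ring]
  rw [PySem.List.pyGetD_natCast, PySem.List.pyGetD_natCast]
  simp

lemma pv_pySetD_cons_succ (c : Char) (cs : List Char) (i : Int) (v : Char) (h : 0 ≤ i) :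
    PySem.List.pySetD (c :: cs) (i + 1) v = c :: PySem.List.pySetD cs i v := by
  rw [PySem.List.pySetD_of_nonneg _ _ (by omega : (0 : Int) ≤ i + 1),
      PySem.List.pySetD_of_nonneg _ _ h]
  rw [show (i + 1).toNat = i.toNat + 1 by omega]
  rfl

-- the letters of cs gathered through pvLpos are exactly filter pvLetter cs
lemma pv_map_get_lpos (cs : List Char) :
    (pvLpos cs).map (fun i => PySem.List.pyGetD cs i ' ') = cs.filter pvLetter := by
  induction cs with
  | nil => rfl
  | cons c cs ih =>
    rw [pv_lpos_cons, List.map_append, List.map_map]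
    have htail : ((pvLpos cs).map ((fun i => PySem.List.pyGetD (c :: cs) i ' ') ∘ (· + 1)))
        = (pvLpos cs).map (fun i => PySem.List.pyGetD cs i ' ') := by
      apply List.map_congr_left
      intro i hi
      exact pv_pyGetD_cons_succ c cs i ' ' (pv_lpos_nonneg cs i hi)
    rw [htail, ih]
    by_cases hl : pvLetter c = true
    · simp [hl, PySem.List.pyGetD_zero_cons]
    · simp [hl]

-- scatter operations at positions ≥ 1 commute with a fixed head
lemma pv_scatter_shift (c : Char) (ps : List (Int × Char)) :
    ∀ (st : List Char), (∀ p ∈ ps, 0 ≤ p.1) →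
    (ps.map (fun p => (p.1 + 1, p.2))).foldl pvScatStep (c :: st)
      = c :: ps.foldl pvScatStep st := by
  induction ps with
  | nil => intro st _; rfl
  | cons p ps ih =>
    intro st h
    have hp : 0 ≤ p.1 := h p List.mem_cons_self
    simp only [List.map_cons, List.foldl_cons]
    have hstep : pvScatStep (c :: st) (p.1 + 1, p.2) = c :: pvScatStep st p := by
      unfold pvScatStep
      rw [pv_pyGetD_cons_succ c st p.1 ' ' hp]
      split_ifs
      · exact pv_pySetD_cons_succ c st p.1 _ hp
      · exact pv_pySetD_cons_succ c st p.1 _ hp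
    rw [hstep]
    exact ih (pvScatStep st p) (fun q hq => h q (List.mem_cons_of_mem _ hq))

-- B's scatter fold equals pvSpec
lemma pv_scatter_spec (cs : List Char) : ∀ (fl : List Char),
    (cs.filter pvLetter).length ≤ fl.length →
    ((pvLpos cs).zip fl).foldl pvScatStep cs = pvSpec cs fl := by
  induction cs with
  | nil => intro fl _; rfl
  | cons c cs ih =>
    intro fl h
    rw [pv_lpos_cons]
    by_cases hl : pvLetter c = true
    · have hcnt : ((c :: cs).filter pvLetter).length = (cs.filter pvLetter).length + 1 := by
        simp [hl]
      obtain ⟨f0, fl', rfl⟩ : ∃ f0 fl', fl = f0 :: fl' := by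
        cases fl with
        | nil => exfalso; rw [hcnt] at h; simp at h
        | cons f0 fl' => exact ⟨f0, fl', rfl⟩
      simp only [hl, if_pos, List.singleton_append, List.zip_cons_cons, List.foldl_cons]
      have hfirst : pvScatStep (c :: cs) (0, f0)
          = (if PySem.Chars.isupper c then PySem.Chars.upperChar f0 else f0) :: cs := by
        unfold pvScatStep
        rw [PySem.List.pyGetD_zero_cons]
        split_ifs
        · rw [PySem.List.pySetD_of_nonneg _ _ (by omega : (0 : Int) ≤ 0)]; rfl
        · rw [PySem.List.pySetD_of_nonneg _ _ (by omega : (0 : Int) ≤ 0)]; rfl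
      rw [hfirst]
      have hzip : ((pvLpos cs).map (· + 1)).zip fl'
          = ((pvLpos cs).zip fl').map (fun p => (p.1 + 1, p.2)) := by
        rw [List.zip_map_left]
        rfl
      rw [hzip, pv_scatter_shift _ _ _ (fun p hp =>
        pv_lpos_nonneg cs p.1 (List.of_mem_zip hp).1)]
      rw [ih fl' (by rw [hcnt] at h; simp only [List.length_cons] at h; omega)]
      rw [pvSpec_cons, if_pos hl]
      simp only [List.headD_cons, List.tail_cons]
    · have hcnt : ((c :: cs).filter pvLetter).length = (cs.filter pvLetter).length := by
        simp [hl]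
      simp only [hl, Bool.false_eq_true, if_false, List.nil_append]
      have hzip : ((pvLpos cs).map (· + 1)).zip fl
          = ((pvLpos cs).zip fl).map (fun p => (p.1 + 1, p.2)) := by
        rw [List.zip_map_left]
        rfl
      rw [hzip, pv_scatter_shift _ _ _ (fun p hp =>
        pv_lpos_nonneg cs p.1 (List.of_mem_zip hp).1)]
      rw [ih fl (by omega)]
      rw [pvSpec_cons, if_neg (by simp [hl])]

-- A's flipped list, written through the letter positions
lemma pv_rev_eq_flipped (cs : List Char) :
    (pvLpos cs).reverse.map (fun i => PySem.Chars.lowerChar (PySem.List.pyGetD cs i ' '))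
      = (cs.reverse.filter pvLetter).map PySem.Chars.lowerChar := by
  have h1 : (pvLpos cs).reverse.map (fun i => PySem.List.pyGetD cs i ' ')
      = (cs.filter pvLetter).reverse := by
    rw [List.map_reverse, pv_map_get_lpos]
  calc (pvLpos cs).reverse.map (fun i => PySem.Chars.lowerChar (PySem.List.pyGetD cs i ' '))
      = ((pvLpos cs).reverse.map (fun i => PySem.List.pyGetD cs i ' ')).map
          PySem.Chars.lowerChar := by rw [List.map_map]; rfl
    _ = (cs.filter pvLetter).reverse.map PySem.Chars.lowerChar := by rw [h1]
    _ = (cs.reverse.filter pvLetter).map PySem.Chars.lowerChar := by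
          rw [List.filter_reverse]

lemma pv_flipped_len (cs : List Char) :
    ((cs.reverse.filter pvLetter).map PySem.Chars.lowerChar).length
      = (cs.filter pvLetter).length := by
  rw [List.length_map, List.filter_reverse, List.length_reverse]

theorem omkeren_eq (text : String) : omkeren text = omkeren_alt text := by
  simp only [omkeren, omkeren_alt, PySem.Str.len_eq]
  rw [pv_fold_eq]
  rw [pv_step1_spec text.toList _ [] 0 (by rw [pv_flipped_len]; omega)]
  rw [pv_rev_eq_flipped]
  rw [pv_scatter_spec text.toList _ (by rw [pv_flipped_len])]
  simp

-- ===== VERDICT (by name: the statement is the Claim_ definition above) =====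
theorem omkeren_spec : Claim_equal_omkeren := by
  intro text _
  unfold Spec_omkeren
  exact omkeren_eq text
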